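-- pv_equiv track=rewrite | github.com/n7tms/AOC | AOC2022/202225.py | toBase5
-- ===== SOURCE A (Python) =====
-- def toBase5(base10):
--     result = ""
--     quot = base10
--     mod1 = quot % 5
--     while quot > 0:
--         if mod1 == 3:
--             result += '='
--             quot = (quot // 5) + 1
--         elif mod1 == 4:
--             result += '-'
--             quot = (quot // 5) + 1
--         else:
--             result += str(mod1)
--             quot = quot // 5
--         mod1 = quot % 5
--
--     return result[::-1]
-- ===== SOURCE B (Python) =====
-- def toBase5(base10):
--     if base10 <= 0:
--         return ""
--     m = base10 % 5
--     return toBase5(base10 // 5 + (1 if m >= 3 else 0)) + "012=-"[m]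
-- ===== Notes on version B (the rewrite author's own statement) =====
-- stated objective: simpler
-- what changed: Replaced the accumulate-then-reverse while loop with a direct recursion that emits higher-order digits as a prefix, and collapsed the three-way branch into a carry flag plus a digit-table lookup "012=-"[m].
import Mathlib
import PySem

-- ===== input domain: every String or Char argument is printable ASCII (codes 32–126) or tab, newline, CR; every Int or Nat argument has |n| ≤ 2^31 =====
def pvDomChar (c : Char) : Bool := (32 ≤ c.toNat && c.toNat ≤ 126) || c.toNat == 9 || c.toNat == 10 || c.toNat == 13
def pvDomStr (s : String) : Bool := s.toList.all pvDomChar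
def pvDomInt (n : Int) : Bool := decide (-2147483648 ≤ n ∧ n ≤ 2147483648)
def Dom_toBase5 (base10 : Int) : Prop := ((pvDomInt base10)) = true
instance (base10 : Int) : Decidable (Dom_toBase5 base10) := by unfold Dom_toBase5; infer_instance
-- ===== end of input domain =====

-- B replaces A's accumulate-then-reverse loop by a direct recursion with a digit-table lookup (objective: simpler).

-- ===== PORT A =====
-- the while loop: state (quot, result); mod1 is recomputed from quot at the top of
-- each iteration, exactly as A recomputes it at the end of each iteration
def toBase5Loop (quot : Int) (result : List Char) : List Char :=
  if quot > 0 then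
    -- mod1 = quot % 5, inlined at its three uses
    if PySem.Int.mod quot 5 = 3 then
      toBase5Loop (PySem.Int.floordiv quot 5 + 1) (result ++ ['='])
    else if PySem.Int.mod quot 5 = 4 then
      toBase5Loop (PySem.Int.floordiv quot 5 + 1) (result ++ ['-'])
    else
      toBase5Loop (PySem.Int.floordiv quot 5) (result ++ PySem.Int.toChars (PySem.Int.mod quot 5))
  else result
termination_by quot.toNat
decreasing_by
  all_goals
    simp only [PySem.Int.floordiv_eq_ediv_of_pos (by omega : (0:Int) < 5),
      PySem.Int.mod_eq_emod_of_pos (by omega : (0:Int) < 5)] at *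
    omega

-- result[::-1] is reverse (PySem.List.slice?_none_none_neg_one)
def toBase5 (base10 : Int) : String :=
  String.ofList (toBase5Loop base10 []).reverse

-- ===== PORT B =====
-- "012=-"[m]; m = n % 5 is always in range, the none case is unreachable
def sdigit (m : Int) : List Char :=
  match PySem.List.pyGet? ['0', '1', '2', '=', '-'] m with
  | some c => [c]
  | none => []

def toBase5AltRec (n : Int) : List Char :=
  if n ≤ 0 then []
  else
    let m := PySem.Int.mod n 5
    toBase5AltRec (PySem.Int.floordiv n 5 + (if 3 ≤ m then 1 else 0)) ++ sdigit m
termination_by n.toNat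
decreasing_by
  rw [PySem.Int.floordiv_eq_ediv_of_pos (by omega)]
  have := Int.emod_nonneg n (by norm_num : (5:Int) ≠ 0)
  have := Int.emod_lt_of_pos n (by norm_num : (0:Int) < 5)
  simp only [PySem.Int.mod_eq_emod_of_pos (a := n) (by omega : (0:Int) < 5)]
  split <;> omega

def toBase5_alt (base10 : Int) : String :=
  String.ofList (toBase5AltRec base10)

-- ===== PRECONDITION & SPEC =====
def Spec_toBase5 (base10 : Int) (out : String) : Prop := out = toBase5_alt base10
instance (base10 : Int) (out : String) : Decidable (Spec_toBase5 base10 out) := by unfold Spec_toBase5; infer_instance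

-- ===== CLAIM (what is proved, stated in full; the proofs are below) =====
def Claim_equal_toBase5 : Prop := ∀ (base10 : Int), Dom_toBase5 base10 → Spec_toBase5 base10 (toBase5 base10)

-- ===== LEMMAS AND PROOFS =====

-- loop invariant: reversing A's accumulator-built list yields B's prefix-built list
theorem toBase5Loop_reverse (k : Nat) :
    ∀ (quot : Int) (res : List Char), quot.toNat ≤ k →
      (toBase5Loop quot res).reverse = toBase5AltRec quot ++ res.reverse := by
  induction k with
  | zero =>
    intro quot res h
    rw [toBase5Loop, toBase5AltRec]
    have : ¬ quot > 0 := by omega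
    simp [this, show quot ≤ 0 by omega]
  | succ k ih =>
    intro quot res h
    rw [toBase5Loop, toBase5AltRec]
    by_cases hq : quot > 0
    · have hm : PySem.Int.mod quot 5 = quot % 5 :=
        PySem.Int.mod_eq_emod_of_pos (by omega)
      have hd : PySem.Int.floordiv quot 5 = quot / 5 :=
        PySem.Int.floordiv_eq_ediv_of_pos (by omega)
      have h0 : 0 ≤ quot % 5 := Int.emod_nonneg quot (by norm_num)
      have h5 : quot % 5 < 5 := Int.emod_lt_of_pos quot (by norm_num)
      simp only [hq, if_pos, hm, hd, show ¬ quot ≤ 0 by omega, if_neg, not_false_iff]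
      by_cases h3 : quot % 5 = 3
      · simp only [h3, show (3:Int) ≤ 3 by norm_num, if_pos]
        rw [ih _ _ (by omega)]
        simp [sdigit, PySem.List.pyGet?, PySem.List.pyIdx?]
      · by_cases h4 : quot % 5 = 4
        · simp only [h4, if_neg (by norm_num : (4:Int) ≠ 3),
            show (3:Int) ≤ 4 by norm_num, if_pos]
          rw [ih _ _ (by omega)]
          simp [sdigit, PySem.List.pyGet?, PySem.List.pyIdx?]
        · have hlt : ¬ (3 ≤ quot % 5) := by omega
          simp only [if_neg h3, if_neg h4, if_neg hlt, add_zero]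
          rw [ih _ _ (by omega)]
          interval_cases hm5 : quot % 5 <;>
            simp_all [sdigit, PySem.List.pyGet?, PySem.List.pyIdx?, PySem.Int.toChars,
              show Nat.toDigits 10 0 = ['0'] from rfl,
              show Nat.toDigits 10 1 = ['1'] from rfl,
              show Nat.toDigits 10 2 = ['2'] from rfl]
    · simp [hq, show quot ≤ 0 by omega]

-- ===== VERDICT (by name: the statement is the Claim_ definition above) =====
theorem toBase5_spec : Claim_equal_toBase5 := by
  intro base10 _
  unfold Spec_toBase5 toBase5 toBase5_alt
  rw [toBase5Loop_reverse base10.toNat base10 [] (le_refl _)]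
  simp
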